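-- pv_equiv track=rewrite | github.com/jackyeung99/Applied_Algorithms | Assignment03/Assignment03_practical.py | beautifulNinjaFormation
-- ===== SOURCE A (Python) =====
-- def beautifulNinjaFormation(n):
--
--     def find_ninjas(n):
--         if n == 1:
--             return [1]
--         elif n == 2:
--             return [1,2]
--
--         return [2 * x -1  for x in find_ninjas((n+1)//2)] + [2 * x  for x in find_ninjas(n//2)]
--
--     return find_ninjas(n)
-- ===== SOURCE B (Python) =====
-- def beautifulNinjaFormation(n):
--     # Iterative bottom-up doubling instead of A's top-down recursion:
--     # grow the beautiful array of size 2^k by the odd/even doubling step,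
--     # then keep the elements <= n.
--     a = [1]
--     while len(a) < n:
--         a = [2 * x - 1 for x in a] + [2 * x for x in a]
--     return [x for x in a if x <= n]
-- ===== Notes on version B (the rewrite author's own statement) =====
-- stated objective: faster
-- what changed: Replaces the top-down divide-and-conquer recursion by an iterative bottom-up doubling loop (grow the size-2^k beautiful array by one odd/even doubling step per iteration, then filter the elements <= n), removing all recursion and repeated subproblem work.
-- outside the precondition, e.g. on beautifulNinjaFormation(0): A raises RecursionError, B returns []
import Mathlib
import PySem

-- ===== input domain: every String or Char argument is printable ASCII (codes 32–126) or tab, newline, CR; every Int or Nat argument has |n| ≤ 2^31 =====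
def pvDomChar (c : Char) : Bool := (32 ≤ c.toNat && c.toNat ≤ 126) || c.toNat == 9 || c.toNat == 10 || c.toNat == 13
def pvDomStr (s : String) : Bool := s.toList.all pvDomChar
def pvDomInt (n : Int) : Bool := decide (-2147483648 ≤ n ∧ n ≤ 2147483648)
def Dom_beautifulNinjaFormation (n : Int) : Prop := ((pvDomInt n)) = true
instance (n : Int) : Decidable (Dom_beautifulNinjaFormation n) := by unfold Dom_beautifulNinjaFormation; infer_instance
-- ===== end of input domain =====

-- B replaces A's top-down recursion by an iterative bottom-up doubling loop (then filter ≤ n);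
-- equivalence is proved for all n ≥ 1 (for n ≤ 0 Python A raises RecursionError).

-- ===== PORT A =====
-- A's nested find_ninjas; for n ≤ 0 the Python recursion never returns (RecursionError),
-- the guard only makes the Lean function total there (those inputs are outside Pre_).
def beautifulNinjaFormation (n : Int) : List Int :=
  if _h0 : n ≤ 0 then []
  else if n = 1 then [1]
  else if n = 2 then [1, 2]
  else
    ((beautifulNinjaFormation (PySem.Int.floordiv (n + 1) 2)).map (fun x => 2 * x - 1)) ++
    ((beautifulNinjaFormation (PySem.Int.floordiv n 2)).map (fun x => 2 * x))
termination_by n.toNat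
decreasing_by
  · rw [PySem.Int.floordiv_eq_ediv_of_pos (by norm_num)]; omega
  · rw [PySem.Int.floordiv_eq_ediv_of_pos (by norm_num)]; omega

-- ===== PORT B =====
-- the 'while len(a) < n' loop of Source B; the Nat fuel (n.toNat is more than enough
-- iterations, since the list at least doubles each step) only bounds the loop for totality
def bnfLoop (fuel : Nat) (n : Int) (a : List Int) : List Int :=
  match fuel with
  | 0 => a
  | Nat.succ f =>
    if (a.length : Int) < n then
      bnfLoop f n (a.map (fun x => 2 * x - 1) ++ a.map (fun x => 2 * x))
    else a

def beautifulNinjaFormation_alt (n : Int) : List Int :=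
  (bnfLoop n.toNat n [1]).filter (fun x => decide (x ≤ n))

-- ===== PRECONDITION & SPEC =====
-- Pre_ excludes only n ≤ 0, where Python A's recursion never bottoms out (RecursionError).
def Pre_beautifulNinjaFormation (n : Int) : Prop := 1 ≤ n
instance (n : Int) : Decidable (Pre_beautifulNinjaFormation n) := by
  unfold Pre_beautifulNinjaFormation; infer_instance

def pvWitness_beautifulNinjaFormation : Int := 5

def Spec_beautifulNinjaFormation (n : Int) (out : List Int) : Prop := out = beautifulNinjaFormation_alt n
instance (n : Int) (out : List Int) : Decidable (Spec_beautifulNinjaFormation n out) := by unfold Spec_beautifulNinjaFormation; infer_instance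

-- ===== CLAIM (what is proved, stated in full; the proofs are below) =====
def Claim_equal_beautifulNinjaFormation : Prop := ∀ (n : Int), Dom_beautifulNinjaFormation n → Pre_beautifulNinjaFormation n → Spec_beautifulNinjaFormation n (beautifulNinjaFormation n)

-- ===== LEMMAS AND PROOFS =====


theorem bnf_zero : beautifulNinjaFormation 0 = [] := by
  rw [beautifulNinjaFormation]; norm_num

theorem bnf_one : beautifulNinjaFormation 1 = [1] := by
  rw [beautifulNinjaFormation]; norm_num

theorem bnf_two : beautifulNinjaFormation 2 = [1, 2] := by
  rw [beautifulNinjaFormation]; norm_num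


-- One-step unfolding of A's recursion valid for ALL 0 ≤ n (including n = 0,1,2).
theorem bnf_unfold (n : Int) (hn : 0 ≤ n) :
    beautifulNinjaFormation n =
      ((beautifulNinjaFormation (PySem.Int.floordiv (n + 1) 2)).map (fun x => 2 * x - 1)) ++
      ((beautifulNinjaFormation (PySem.Int.floordiv n 2)).map (fun x => 2 * x)) := by
  rcases (show n = 0 ∨ n = 1 ∨ n = 2 ∨ 3 ≤ n by omega) with h | h | h | h
  · subst h; simp [bnf_zero]
  · subst h; simp [bnf_zero, bnf_one]
  · subst h; simp [bnf_one, bnf_two]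
  · rw [beautifulNinjaFormation]
    have h0 : ¬ n ≤ 0 := by omega
    have h1 : n ≠ 1 := by omega
    have h2 : n ≠ 2 := by omega
    simp [h0, h1, h2]

theorem bnf_length (k : Nat) : ∀ (n : Int), n.toNat ≤ k → 0 ≤ n →
    ((beautifulNinjaFormation n).length : Int) = n := by
  induction k with
  | zero =>
    intro n hk hn
    have : n = 0 := by omega
    subst this; simp [bnf_zero]
  | succ k ih =>
    intro n hk hn
    by_cases h : n ≤ 0
    · have : n = 0 := by omega
      subst this; simp [bnf_zero]
    · rcases (show n = 1 ∨ n = 2 ∨ 3 ≤ n by omega) with h1 | h1 | h1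
      · subst h1; simp [bnf_one]
      · subst h1; simp [bnf_two]
      rw [bnf_unfold n hn]
      have e1 : PySem.Int.floordiv (n + 1) 2 = (n + 1) / 2 :=
        PySem.Int.floordiv_eq_ediv_of_pos (by norm_num)
      have e2 : PySem.Int.floordiv n 2 = n / 2 :=
        PySem.Int.floordiv_eq_ediv_of_pos (by norm_num)
      rw [e1, e2]
      have l1 := ih ((n + 1) / 2) (by omega) (by omega)
      have l2 := ih (n / 2) (by omega) (by omega)
      simp only [List.length_append, List.length_map]
      push_cast
      omega

-- Filtering the beautiful array of any size m ≥ n down to the elements ≤ n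
-- gives exactly the beautiful array of size n.
theorem bnf_filter (k : Nat) : ∀ (m n : Int), m.toNat ≤ k → 0 ≤ n → n ≤ m →
    (beautifulNinjaFormation m).filter (fun x => decide (x ≤ n)) = beautifulNinjaFormation n := by
  induction k with
  | zero =>
    intro m n hk hn hnm
    have hm : m = 0 := by omega
    have hn0 : n = 0 := by omega
    subst hm; subst hn0; simp [bnf_zero]
  | succ k ih =>
    intro m n hk hn hnm
    by_cases h : m ≤ 0
    · have hm : m = 0 := by omega
      have hn0 : n = 0 := by omega
      subst hm; subst hn0; simp [bnf_zero]
    · rcases (show m = 1 ∨ m = 2 ∨ 3 ≤ m by omega) with hm | hm | hm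
      · subst hm
        rcases (show n = 0 ∨ n = 1 by omega) with h1 | h1 <;> subst h1 <;>
          simp [bnf_zero, bnf_one, List.filter]
      · subst hm
        rcases (show n = 0 ∨ n = 1 ∨ n = 2 by omega) with h1 | h1 | h1 <;> subst h1 <;>
          simp [bnf_zero, bnf_one, bnf_two, List.filter]
      have e1 : PySem.Int.floordiv (m + 1) 2 = (m + 1) / 2 :=
        PySem.Int.floordiv_eq_ediv_of_pos (by norm_num)
      have e2 : PySem.Int.floordiv m 2 = m / 2 :=
        PySem.Int.floordiv_eq_ediv_of_pos (by norm_num)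
      have f1 : PySem.Int.floordiv (n + 1) 2 = (n + 1) / 2 :=
        PySem.Int.floordiv_eq_ediv_of_pos (by norm_num)
      have f2 : PySem.Int.floordiv n 2 = n / 2 :=
        PySem.Int.floordiv_eq_ediv_of_pos (by norm_num)
      rw [bnf_unfold m (by omega), List.filter_append, List.filter_map, List.filter_map]
      have c1 : ∀ x : Int, decide (2 * x - 1 ≤ n) = decide (x ≤ (n + 1) / 2) := by
        intro x; simp only [decide_eq_decide]; omega
      have c2 : ∀ x : Int, decide (2 * x ≤ n) = decide (x ≤ n / 2) := by
        intro x; simp only [decide_eq_decide]; omega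
      simp only [Function.comp_def]
      rw [List.filter_congr (fun x _ => c1 x), List.filter_congr (fun x _ => c2 x)]
      rw [e1, e2]
      rw [ih ((m + 1) / 2) ((n + 1) / 2) (by omega) (by omega) (by omega)]
      rw [ih (m / 2) (n / 2) (by omega) (by omega) (by omega)]
      rw [← f1, ← f2, ← bnf_unfold n hn]

-- The loop, started on the beautiful array of size m with enough fuel, ends on a
-- beautiful array of some size M ≥ n.
theorem bnf_loop (fuel : Nat) : ∀ (m n : Int), 1 ≤ m → n ≤ m + fuel →
    ∃ M : Int, 1 ≤ M ∧ n ≤ M ∧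
      bnfLoop fuel n (beautifulNinjaFormation m) = beautifulNinjaFormation M := by
  induction fuel with
  | zero =>
    intro m n hm hn
    exact ⟨m, hm, by omega, rfl⟩
  | succ f ih =>
    intro m n hm hn
    have hlen : ((beautifulNinjaFormation m).length : Int) = m :=
      bnf_length m.toNat m le_rfl (by omega)
    rw [bnfLoop]
    by_cases hc : ((beautifulNinjaFormation m).length : Int) < n
    · rw [if_pos hc]
      have hstep :
          (beautifulNinjaFormation m).map (fun x => 2 * x - 1) ++
            (beautifulNinjaFormation m).map (fun x => 2 * x)
            = beautifulNinjaFormation (2 * m) := by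
        have g1 : PySem.Int.floordiv (2 * m + 1) 2 = m := by
          rw [PySem.Int.floordiv_eq_ediv_of_pos (by norm_num)]; omega
        have g2 : PySem.Int.floordiv (2 * m) 2 = m := by
          rw [PySem.Int.floordiv_eq_ediv_of_pos (by norm_num)]; omega
        rw [bnf_unfold (2 * m) (by omega), g1, g2]
      rw [hstep]
      exact ih (2 * m) n (by omega) (by omega)
    · rw [if_neg hc]
      exact ⟨m, hm, by omega, rfl⟩

-- ===== VERDICT (by name: the statement is the Claim_ definition above) =====
theorem beautifulNinjaFormation_spec : Claim_equal_beautifulNinjaFormation := by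
  intro n _ hpre
  unfold Spec_beautifulNinjaFormation beautifulNinjaFormation_alt
  have hpre' : 1 ≤ n := hpre
  obtain ⟨M, hM1, hMn, hM⟩ := bnf_loop n.toNat 1 n (by omega) (by omega)
  rw [← bnf_one, hM, bnf_filter M.toNat M n le_rfl (by omega) hMn]
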